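-- pv_equiv track=rewrite | github.com/wangjiehan/Codes | 数据结构与算法/牛客刷题/螺旋矩阵.py | _go_edge
-- ===== SOURCE A (Python) =====
-- def _go_edge(arr, r0, c0, r1, c1):
-- 	res = []
-- 	if r0 == r1:
-- 		for i in range(c0, c1+1):
-- 			res.append(arr[r0][i])
-- 	elif c0 == c1:
-- 		for i in range(r0, r1+1):
-- 			res.append(arr[i][c0])
-- 	else:
-- 		for i in range(c0, c1):
-- 			res.append(arr[r0][i])
-- 		for i in range(r0, r1):
-- 			res.append(arr[i][c1])
-- 		for i in range(c1, c0, -1):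
-- 			res.append(arr[r1][i])
-- 		for i in range(r1, r0, -1):
-- 			res.append(arr[i][c0])
-- 	return res
-- ===== SOURCE B (Python) =====
-- def _go_edge(arr, r0, c0, r1, c1):
--     # Single clockwise walk with a turn rule instead of four separate range loops.
--     if r0 == r1:
--         total = c1 - c0 + 1
--     elif c0 == c1:
--         total = r1 - r0 + 1
--     else:
--         total = 2 * (r1 - r0) + 2 * (c1 - c0)
--     dirs = ((0, 1), (1, 0), (0, -1), (-1, 0))
--     res = []
--     r, c, d = r0, c0, 0
--     for _ in range(total):
--         res.append(arr[r][c])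
--         nr, nc = r + dirs[d][0], c + dirs[d][1]
--         if nr < r0 or nr > r1 or nc < c0 or nc > c1:
--             d = (d + 1) % 4
--             nr, nc = r + dirs[d][0], c + dirs[d][1]
--         r, c = nr, nc
--     return res
-- ===== Notes on version B (the rewrite author's own statement) =====
-- stated objective: alternative
-- what changed: Replaces A's four branch-specific range loops by a single unified clockwise walk: precompute the number of ring cells, then repeatedly emit arr[r][c] and step right/down/left/up, turning clockwise whenever the next cell would leave the ring.
-- outside the precondition, e.g. on _go_edge([[1, 2], [3, 4]], 1, 0, 0, 1): A returns [3, 2], B returns []; on _go_edge([[1, 2], [3, 4]], 0, 1, 1, 0): A returns [1, 4], B returns []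
import Mathlib
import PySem

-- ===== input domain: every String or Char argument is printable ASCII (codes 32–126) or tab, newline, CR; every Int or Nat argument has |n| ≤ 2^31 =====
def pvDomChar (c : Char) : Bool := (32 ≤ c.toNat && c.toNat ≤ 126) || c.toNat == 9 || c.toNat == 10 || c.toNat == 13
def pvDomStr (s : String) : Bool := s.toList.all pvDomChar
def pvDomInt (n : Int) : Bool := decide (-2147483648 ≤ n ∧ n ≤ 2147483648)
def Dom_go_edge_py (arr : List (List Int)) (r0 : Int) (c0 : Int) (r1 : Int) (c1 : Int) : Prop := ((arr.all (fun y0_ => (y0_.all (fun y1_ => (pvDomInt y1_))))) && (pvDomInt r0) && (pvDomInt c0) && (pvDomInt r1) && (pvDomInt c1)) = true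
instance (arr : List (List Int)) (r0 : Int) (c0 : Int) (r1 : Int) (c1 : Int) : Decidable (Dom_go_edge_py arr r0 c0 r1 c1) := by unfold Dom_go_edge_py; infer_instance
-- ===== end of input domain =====

-- B replaces A's four branch-specific range loops by one unified clockwise walk (count the ring cells,
-- then step right/down/left/up, turning at the ring boundary) — objective: alternative decomposition, same cost.

-- ===== PORT A =====
-- arr[r][c] as total indexing (Pre_ keeps every accessed index in Python range)
def pvCell (arr : List (List Int)) (r c : Int) : Int :=
  PySem.List.pyGetD (PySem.List.pyGetD arr r []) c 0

def go_edge_py (arr : List (List Int)) (r0 : Int) (c0 : Int) (r1 : Int) (c1 : Int) : List Int :=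
  if r0 = r1 then
    (PySem.List.pyRange c0 (c1 + 1) 1).foldl (fun res i => res ++ [pvCell arr r0 i]) []
  else if c0 = c1 then
    (PySem.List.pyRange r0 (r1 + 1) 1).foldl (fun res i => res ++ [pvCell arr i c0]) []
  else
    let res := (PySem.List.pyRange c0 c1 1).foldl (fun res i => res ++ [pvCell arr r0 i]) []
    let res := (PySem.List.pyRange r0 r1 1).foldl (fun res i => res ++ [pvCell arr i c1]) res
    let res := (PySem.List.pyRange c1 c0 (-1)).foldl (fun res i => res ++ [pvCell arr r1 i]) res
    let res := (PySem.List.pyRange r1 r0 (-1)).foldl (fun res i => res ++ [pvCell arr i c0]) res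
    res

-- ===== PORT B =====
-- dirs[d] of Source B
def pvStep (d : Nat) : Int × Int :=
  if d = 0 then (0, 1) else if d = 1 then (1, 0) else if d = 2 then (0, -1) else (-1, 0)

-- the 'for _ in range(total)' walk of Source B, fuel = remaining iterations, state (r, c, d)
def pvWalk (arr : List (List Int)) (r0 c0 r1 c1 : Int) : Nat → Int → Int → Nat → List Int
  | 0, _, _, _ => []
  | n + 1, r, c, d =>
    let v := pvCell arr r c
    let nr := r + (pvStep d).1
    let nc := c + (pvStep d).2
    if nr < r0 ∨ nr > r1 ∨ nc < c0 ∨ nc > c1 then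
      let d' := (d + 1) % 4
      v :: pvWalk arr r0 c0 r1 c1 n (r + (pvStep d').1) (c + (pvStep d').2) d'
    else
      v :: pvWalk arr r0 c0 r1 c1 n nr nc d

def go_edge_py_alt (arr : List (List Int)) (r0 : Int) (c0 : Int) (r1 : Int) (c1 : Int) : List Int :=
  let total : Int :=
    if r0 = r1 then c1 - c0 + 1
    else if c0 = c1 then r1 - r0 + 1
    else 2 * (r1 - r0) + 2 * (c1 - c0)
  pvWalk arr r0 c0 r1 c1 total.toNat r0 c0 0

-- ===== PRECONDITION & SPEC =====
-- Pre_ excludes (a) out-of-range indices on a non-empty traversal, on which A raises IndexError, and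
-- (b) mixed inverted bounds (one of the two coordinate pairs strictly inverted, the other properly
-- ordered and distinct), on which A's half-open loops return an accidental partial traversal that is
-- not a ring; fully inverted / degenerate inverted bounds, where A touches no cell and returns [],
-- stay inside Pre_.
def Pre_go_edge_py (arr : List (List Int)) (r0 : Int) (c0 : Int) (r1 : Int) (c1 : Int) : Prop :=
  (r0 ≤ r1 ∧ c0 ≤ c1 ∧ PySem.Raise.InRange arr.length r0 ∧ PySem.Raise.InRange arr.length r1 ∧
    ∀ row ∈ arr, PySem.Raise.InRange row.length c0 ∧ PySem.Raise.InRange row.length c1) ∨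
  (r1 < r0 ∧ c1 < c0) ∨ (r0 = r1 ∧ c1 < c0) ∨ (c0 = c1 ∧ r1 < r0)
instance (arr : List (List Int)) (r0 : Int) (c0 : Int) (r1 : Int) (c1 : Int) : Decidable (Pre_go_edge_py arr r0 c0 r1 c1) := by unfold Pre_go_edge_py; infer_instance

def pvWitness_go_edge_py : List (List Int) × Int × Int × Int × Int := ([[1, 2], [3, 4]], 0, 0, 1, 1)

def Spec_go_edge_py (arr : List (List Int)) (r0 : Int) (c0 : Int) (r1 : Int) (c1 : Int) (out : List Int) : Prop := out = go_edge_py_alt arr r0 c0 r1 c1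
instance (arr : List (List Int)) (r0 : Int) (c0 : Int) (r1 : Int) (c1 : Int) (out : List Int) : Decidable (Spec_go_edge_py arr r0 c0 r1 c1 out) := by unfold Spec_go_edge_py; infer_instance

-- ===== CLAIM (what is proved, stated in full; the proofs are below) =====
def Claim_equal_go_edge_py : Prop := ∀ (arr : List (List Int)) (r0 : Int) (c0 : Int) (r1 : Int) (c1 : Int), Dom_go_edge_py arr r0 c0 r1 c1 → Pre_go_edge_py arr r0 c0 r1 c1 → Spec_go_edge_py arr r0 c0 r1 c1 (go_edge_py arr r0 c0 r1 c1)

-- ===== LEMMAS AND PROOFS =====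

theorem pvRange_neg_succ_right (a b : Int) (h : b ≤ a) :
    PySem.List.pyRange a (b - 1) (-1) = PySem.List.pyRange a b (-1) ++ [b] := by
  rw [PySem.List.pyRange_neg_one_eq_reverse, PySem.List.pyRange_neg_one_eq_reverse,
    show b - 1 + 1 = b by ring, PySem.List.pyRange_one_cons (by omega : b < a + 1)]
  simp


theorem pvWalk_right (arr : List (List Int)) (r0 c0 r1 c1 : Int) (hr : r0 ≤ r1)
    (k m : Nat) (c : Int) (hc : c + k = c1) (hc0 : c0 ≤ c) :
    pvWalk arr r0 c0 r1 c1 (k + 1 + m) r0 c 0 =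
      (PySem.List.pyRange c (c1 + 1) 1).map (fun i => pvCell arr r0 i) ++
        pvWalk arr r0 c0 r1 c1 m (r0 + 1) c1 1 := by
  induction k generalizing c with
  | zero =>
    have hcc : c = c1 := by omega
    subst hcc
    rw [show 0 + 1 + m = m + 1 from by omega]
    simp only [pvWalk, pvStep]
    rw [if_pos (by norm_num)]
    rw [PySem.List.pyRange_one_singleton]
    norm_num
  | succ k ih =>
    have hc' : c + (k : Int) + 1 = c1 := by push_cast at hc; omega
    rw [show k + 1 + 1 + m = (k + 1 + m) + 1 from by omega]
    simp only [pvWalk, pvStep]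
    rw [if_neg (by norm_num; omega)]
    rw [PySem.List.pyRange_one_cons (show c < c1 + 1 by omega)]
    have hih := ih (c + 1) (by omega) (by omega)
    simp only [List.map_cons, List.cons_append]
    norm_num
    rw [hih]


theorem pvWalk_down (arr : List (List Int)) (r0 c0 r1 c1 : Int) (hc : c0 ≤ c1)
    (k m : Nat) (r : Int) (hr : r + k = r1) (hr0 : r0 ≤ r) :
    pvWalk arr r0 c0 r1 c1 (k + 1 + m) r c1 1 =
      (PySem.List.pyRange r (r1 + 1) 1).map (fun i => pvCell arr i c1) ++
        pvWalk arr r0 c0 r1 c1 m r1 (c1 - 1) 2 := by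
  induction k generalizing r with
  | zero =>
    have hrr : r = r1 := by omega
    subst hrr
    rw [show 0 + 1 + m = m + 1 from by omega]
    simp only [pvWalk, pvStep]
    rw [if_pos (by norm_num)]
    rw [PySem.List.pyRange_one_singleton]
    norm_num
    rw [sub_eq_add_neg]
  | succ k ih =>
    have hr' : r + (k : Int) + 1 = r1 := by push_cast at hr; omega
    rw [show k + 1 + 1 + m = (k + 1 + m) + 1 from by omega]
    simp only [pvWalk, pvStep]
    rw [if_neg (by norm_num; omega)]
    rw [PySem.List.pyRange_one_cons (show r < r1 + 1 by omega)]
    have hih := ih (r + 1) (by omega) (by omega)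
    simp only [List.map_cons, List.cons_append]
    norm_num
    rw [hih]


theorem pvWalk_left (arr : List (List Int)) (r0 c0 r1 c1 : Int) (hr : r0 ≤ r1)
    (k m : Nat) (c : Int) (hc : c0 + k = c) (hc1 : c ≤ c1) :
    pvWalk arr r0 c0 r1 c1 (k + 1 + m) r1 c 2 =
      (PySem.List.pyRange c (c0 - 1) (-1)).map (fun i => pvCell arr r1 i) ++
        pvWalk arr r0 c0 r1 c1 m (r1 - 1) c0 3 := by
  induction k generalizing c with
  | zero =>
    have hcc : c = c0 := by omega
    rw [hcc]
    rw [show 0 + 1 + m = m + 1 from by omega]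
    simp only [pvWalk, pvStep]
    rw [if_pos (by norm_num)]
    rw [PySem.List.pyRange_neg_one_cons (show c0 - 1 < c0 by omega),
      PySem.List.pyRange_neg_one_eq_nil (le_refl (c0 - 1))]
    norm_num
    rw [sub_eq_add_neg]
  | succ k ih =>
    have hc' : c0 + (k : Int) + 1 = c := by push_cast at hc; omega
    rw [show k + 1 + 1 + m = (k + 1 + m) + 1 from by omega]
    simp only [pvWalk, pvStep]
    rw [if_neg (by norm_num; omega)]
    rw [PySem.List.pyRange_neg_one_cons (show c0 - 1 < c by omega)]
    have hih := ih (c - 1) (by omega) (by omega)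
    simp only [List.map_cons, List.cons_append]
    norm_num
    rw [show c + -1 = c - 1 from by ring, hih]


theorem pvWalk_up (arr : List (List Int)) (r0 c0 r1 c1 : Int) (hc : c0 ≤ c1)
    (k : Nat) (r : Int) (hr : r0 + k = r) (hr1 : r ≤ r1) :
    pvWalk arr r0 c0 r1 c1 k r c0 3 =
      (PySem.List.pyRange r r0 (-1)).map (fun i => pvCell arr i c0) := by
  induction k generalizing r with
  | zero =>
    have hrr : r = r0 := by omega
    rw [hrr]
    simp [pvWalk, PySem.List.pyRange_neg_one_eq_nil (le_refl r0)]
  | succ k ih =>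
    have hr' : r0 + (k : Int) + 1 = r := by push_cast at hr; omega
    rw [show k + 1 = k + 1 from rfl]
    simp only [pvWalk, pvStep]
    rw [if_neg (by norm_num; omega)]
    rw [PySem.List.pyRange_neg_one_cons (show r0 < r by omega)]
    have hih := ih (r - 1) (by omega) (by omega)
    simp only [List.map_cons]
    norm_num
    rw [show r + -1 = r - 1 from by ring, hih]

theorem pvWalk_col_start (arr : List (List Int)) (r0 c0 r1 : Int) (n : Nat) :
    pvWalk arr r0 c0 r1 c0 (n + 1) r0 c0 0 =
      pvCell arr r0 c0 :: pvWalk arr r0 c0 r1 c0 n (r0 + 1) c0 1 := by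
  simp only [pvWalk, pvStep]
  rw [if_pos (by norm_num)]
  norm_num


theorem pv_main (arr : List (List Int)) (r0 c0 r1 c1 : Int)
    (hr : r0 ≤ r1) (hc : c0 ≤ c1) :
    go_edge_py arr r0 c0 r1 c1 = go_edge_py_alt arr r0 c0 r1 c1 := by
  by_cases h1 : r0 = r1
  · subst h1
    simp only [go_edge_py, go_edge_py_alt, ite_true]
    rw [PySem.List.foldl_append_singleton_eq_map (pvCell arr r0) _ []]
    rw [show (c1 - c0 + 1).toNat = (c1 - c0).toNat + 1 + 0 from by omega]
    rw [pvWalk_right arr r0 c0 r0 c1 le_rfl _ 0 c0 (by omega) le_rfl]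
    simp [pvWalk]
  · by_cases h2 : c0 = c1
    · subst h2
      have hlt : r0 < r1 := lt_of_le_of_ne hr h1
      simp only [go_edge_py, go_edge_py_alt, if_neg h1, ite_true]
      rw [PySem.List.foldl_append_singleton_eq_map (fun i => pvCell arr i c0) _ []]
      -- B: first step turns immediately (c0 + 1 > c1 = c0), then walks down
      rw [show (r1 - r0 + 1).toNat = ((r1 - r0).toNat - 1 + 1 + 0) + 1 from by omega]
      rw [pvWalk_col_start]
      rw [pvWalk_down arr r0 c0 r1 c0 le_rfl _ 0 (r0 + 1) (by omega) (by omega)]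
      rw [PySem.List.pyRange_one_cons (show r0 < r1 + 1 by omega)]
      simp [pvWalk]
    · have hrlt : r0 < r1 := lt_of_le_of_ne hr h1
      have hclt : c0 < c1 := lt_of_le_of_ne hc h2
      simp only [go_edge_py, go_edge_py_alt, if_neg h1, if_neg h2]
      rw [PySem.List.foldl_append_singleton_eq_map (pvCell arr r0) _ [],
        PySem.List.foldl_append_singleton_eq_map (fun i => pvCell arr i c1),
        PySem.List.foldl_append_singleton_eq_map (pvCell arr r1),
        PySem.List.foldl_append_singleton_eq_map (fun i => pvCell arr i c0)]
      -- B side: four phases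
      rw [show (2 * (r1 - r0) + 2 * (c1 - c0)).toNat =
          (c1 - c0).toNat + 1 + (((r1 - r0).toNat - 1) + 1 + (((c1 - c0).toNat - 1) + 1 + ((r1 - r0).toNat - 1))) from by omega]
      rw [pvWalk_right arr r0 c0 r1 c1 hr _ _ c0 (by omega) le_rfl]
      rw [pvWalk_down arr r0 c0 r1 c1 hc _ _ (r0 + 1) (by omega) (by omega)]
      rw [pvWalk_left arr r0 c0 r1 c1 hr _ _ (c1 - 1) (by omega) (by omega)]
      rw [pvWalk_up arr r0 c0 r1 c1 hc _ (r1 - 1) (by omega) (by omega)]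
      -- align the segment boundaries
      rw [PySem.List.pyRange_one_succ_right hc,
        show r1 + 1 = (r1 - 1) + 1 + 1 from by ring]
      rw [PySem.List.pyRange_one_succ_right (show r0 + 1 ≤ r1 - 1 + 1 by omega)]
      rw [pvRange_neg_succ_right (c1 - 1) c0 (by omega)]
      rw [PySem.List.pyRange_one_cons (show r0 < r1 by omega)]
      rw [PySem.List.pyRange_neg_one_cons (show c0 < c1 by omega)]
      rw [PySem.List.pyRange_neg_one_cons (show r0 < r1 by omega)]
      simp [List.append_assoc]

-- both programs touch no cell and return [] on inverted bounds
theorem pv_degenerate (arr : List (List Int)) (r0 c0 r1 c1 : Int)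
    (h : (r1 < r0 ∧ c1 < c0) ∨ (r0 = r1 ∧ c1 < c0) ∨ (c0 = c1 ∧ r1 < r0)) :
    go_edge_py arr r0 c0 r1 c1 = go_edge_py_alt arr r0 c0 r1 c1 := by
  rcases h with ⟨h1, h2⟩ | ⟨h1, h2⟩ | ⟨h1, h2⟩
  · simp only [go_edge_py, go_edge_py_alt, if_neg (show ¬r0 = r1 by omega),
      if_neg (show ¬c0 = c1 by omega)]
    rw [PySem.List.pyRange_one_eq_nil (show c1 ≤ c0 by omega),
      PySem.List.pyRange_one_eq_nil (show r1 ≤ r0 by omega),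
      PySem.List.pyRange_neg_one_eq_nil (show c1 ≤ c0 by omega),
      PySem.List.pyRange_neg_one_eq_nil (show r1 ≤ r0 by omega),
      show (2 * (r1 - r0) + 2 * (c1 - c0)).toNat = 0 from by omega]
    simp [pvWalk]
  · subst h1
    simp only [go_edge_py, go_edge_py_alt, ite_true]
    rw [PySem.List.pyRange_one_eq_nil (show c1 + 1 ≤ c0 by omega),
      show (c1 - c0 + 1).toNat = 0 from by omega]
    simp [pvWalk]
  · subst h1
    simp only [go_edge_py, go_edge_py_alt, if_neg (show ¬r0 = r1 by omega), ite_true]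
    rw [PySem.List.pyRange_one_eq_nil (show r1 + 1 ≤ r0 by omega),
      show (r1 - r0 + 1).toNat = 0 from by omega]
    simp [pvWalk]

-- ===== VERDICT (by name: the statement is the Claim_ definition above) =====
theorem go_edge_py_spec : Claim_equal_go_edge_py := by
  intro arr r0 c0 r1 c1 _ hpre
  unfold Spec_go_edge_py
  rcases hpre with h | h
  · exact pv_main arr r0 c0 r1 c1 h.1 h.2.1
  · exact pv_degenerate arr r0 c0 r1 c1 h
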